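-- pv_equiv track=rewrite | github.com/agent-persona/personas-pipeline | evaluation/evaluation/metrics.py | _phrase_hits
-- ===== SOURCE A (Python) =====
-- from typing import Sequence
--
-- def _phrase_hits(text: str, phrases: Sequence[str]) -> int:
--     normalized = text.lower()
--     hits = 0
--     for phrase in phrases:
--         cleaned = phrase.strip().lower()
--         if cleaned and cleaned in normalized:
--             hits += 1
--     return hits
-- ===== SOURCE B (Python) =====
-- def _phrase_hits(text, phrases):
--     # Aggregate duplicate phrases with a counter so each distinct cleaned
--     # phrase is substring-tested against the text only once.
--     normalized = text.lower()
--     counts = {}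
--     for phrase in phrases:
--         cleaned = phrase.strip().lower()
--         if cleaned:
--             counts[cleaned] = counts.get(cleaned, 0) + 1
--     return sum(n for c, n in counts.items() if c in normalized)
-- ===== Notes on version B (the rewrite author's own statement) =====
-- stated objective: alternative
-- what changed: B aggregates the cleaned phrases into a counter dict first and then substring-tests each distinct cleaned phrase exactly once, summing multiplicities, instead of scanning the text once per phrase.
import Mathlib
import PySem

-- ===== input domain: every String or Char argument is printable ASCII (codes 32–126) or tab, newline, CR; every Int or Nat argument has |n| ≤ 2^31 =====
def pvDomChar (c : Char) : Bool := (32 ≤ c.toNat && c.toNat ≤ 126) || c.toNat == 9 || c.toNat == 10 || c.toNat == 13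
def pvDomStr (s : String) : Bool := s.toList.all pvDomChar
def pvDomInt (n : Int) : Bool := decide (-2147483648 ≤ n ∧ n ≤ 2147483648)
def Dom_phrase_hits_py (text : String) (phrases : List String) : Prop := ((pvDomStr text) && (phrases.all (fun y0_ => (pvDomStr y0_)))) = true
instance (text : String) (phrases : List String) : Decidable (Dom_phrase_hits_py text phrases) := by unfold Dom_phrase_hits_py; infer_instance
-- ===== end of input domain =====

-- B aggregates the cleaned phrases into a counter dict and substring-tests each
-- distinct cleaned phrase once, summing multiplicities (objective: alternative).

-- ===== PORT A =====
def phrase_hits_py (text : String) (phrases : List String) : Int :=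
  let normalized := PySem.Str.lower text
  phrases.foldl (fun hits phrase =>
    let cleaned := PySem.Str.lower (PySem.Str.strip phrase)
    if cleaned ≠ "" ∧ PySem.Str.isIn cleaned normalized then hits + 1 else hits) 0

-- ===== PORT B =====
def phrase_hits_py_alt (text : String) (phrases : List String) : Int :=
  let normalized := PySem.Str.lower text
  let counts : PySem.Dict String Int := phrases.foldl (fun d phrase =>
    let cleaned := PySem.Str.lower (PySem.Str.strip phrase)
    if cleaned ≠ "" then d.insert cleaned (d.getD cleaned 0 + 1) else d) PySem.Dict.empty
  ((counts.items.filter (fun kv => PySem.Str.isIn kv.1 normalized)).map (·.2)).sum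

-- ===== PRECONDITION & SPEC =====
def Spec_phrase_hits_py (text : String) (phrases : List String) (out : Int) : Prop := out = phrase_hits_py_alt text phrases
instance (text : String) (phrases : List String) (out : Int) : Decidable (Spec_phrase_hits_py text phrases out) := by unfold Spec_phrase_hits_py; infer_instance

-- ===== CLAIM (what is proved, stated in full; the proofs are below) =====
def Claim_equal_phrase_hits_py : Prop := ∀ (text : String) (phrases : List String), Dom_phrase_hits_py text phrases → Spec_phrase_hits_py text phrases (phrase_hits_py text phrases)

-- ===== LEMMAS AND PROOFS =====

-- the cleaning step shared by both programs
def pvClean (p : String) : String := PySem.Str.lower (PySem.Str.strip p)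

-- A's loop counts the nonempty cleaned phrases that occur in the text
theorem pv_foldl_count (nrm : String) (l : List String) (acc : Int) :
      l.foldl (fun h p => if pvClean p ≠ "" ∧ PySem.Str.isIn (pvClean p) nrm then h + 1 else h) acc
        = acc + (((l.map pvClean).filter (fun c => c ≠ "")).countP
            (fun c => PySem.Str.isIn c nrm) : Int) := by
  induction l generalizing acc with
  | nil => simp
  | cons x xs ih =>
    simp only [List.foldl_cons, List.map_cons, List.filter_cons]
    by_cases h1 : pvClean x = ""
    · rw [if_neg (fun hc => hc.1 h1), ih]
      simp [h1]
    · by_cases h2 : PySem.Str.isIn (pvClean x) nrm = true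
      · rw [if_pos ⟨h1, h2⟩, ih, if_pos (by simpa using h1),
          List.countP_cons_of_pos (p := fun c => PySem.Str.isIn c nrm) (pa := h2)]
        push_cast; ring
      · rw [if_neg (fun hc => h2 hc.2), ih, if_pos (by simpa using h1),
          List.countP_cons_of_neg (p := fun c => PySem.Str.isIn c nrm) (pa := h2)]

-- B's guarded counting loop is the plain counting loop over the cleaned, nonempty phrases
theorem pv_foldl_dict (l : List String) (d : PySem.Dict String Int) :
      l.foldl (fun d p =>
          if pvClean p ≠ "" then d.insert (pvClean p) (d.getD (pvClean p) 0 + 1) else d) d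
        = ((l.map pvClean).filter (fun c => c ≠ "")).foldl
            (fun d c => d.insert c (d.getD c 0 + 1)) d := by
  induction l generalizing d with
  | nil => simp
  | cons x xs ih =>
    simp only [List.foldl_cons, List.map_cons, List.filter_cons]
    by_cases h : pvClean x = ""
    · rw [if_neg (by simpa using h), ih]
      simp [h]
    · rw [if_pos h, ih]
      simp [h]

-- ===== VERDICT (by name: the statement is the Claim_ definition above) =====
theorem phrase_hits_py_spec : Claim_equal_phrase_hits_py := by
  intro text phrases _
  unfold Spec_phrase_hits_py phrase_hits_py phrase_hits_py_alt
  simp only []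
  set n := PySem.Str.lower text with hn
  set L : List String := (phrases.map pvClean).filter (fun c => c ≠ "") with hL
  -- B's dict is the counter of L
  have hdict :
      phrases.foldl (fun d phrase =>
        let cleaned := PySem.Str.lower (PySem.Str.strip phrase)
        if cleaned ≠ "" then d.insert cleaned (d.getD cleaned 0 + 1) else d) PySem.Dict.empty
      = PySem.Dict.counter L := by
    rw [show (fun (d : PySem.Dict String Int) (phrase : String) =>
        let cleaned := PySem.Str.lower (PySem.Str.strip phrase)
        if cleaned ≠ "" then d.insert cleaned (d.getD cleaned 0 + 1) else d)
      = (fun d p => if pvClean p ≠ "" then d.insert (pvClean p) (d.getD (pvClean p) 0 + 1) else d)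
      from rfl]
    rw [pv_foldl_dict, ← hL, PySem.Dict.foldl_insert_getD_add_one_eq_counter]
  rw [hdict, PySem.Dict.items_counter]
  -- B's sum over the distinct cleaned phrases is L.countP
  have hperm : (PySem.Set.ofList L).Perm L.dedup :=
    (List.perm_ext_iff_of_nodup (PySem.Set.nodup_ofList L) L.nodup_dedup).2
      (fun x => by rw [PySem.Set.mem_ofList, List.mem_dedup])
  have hB :
      ((((PySem.Set.ofList L).map (fun k => (k, (L.count k : Int)))).filter
          (fun kv => PySem.Str.isIn kv.1 n)).map (·.2)).sum
      = ((L.countP (fun c => PySem.Str.isIn c n)) : Int) := by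
    rw [List.filter_map, List.map_map]
    simp only [Function.comp_def]
    rw [((hperm.filter (fun k => PySem.Str.isIn k n)).map (fun k => (L.count k : Int))).sum_eq,
      ← List.sum_map_count_dedup_filter_eq_countP (fun k => PySem.Str.isIn k n) L,
      Nat.cast_list_sum, List.map_map]
    simp only [Function.comp_def]
  rw [hB]
  -- A's count equals the same countP
  rw [show (fun (hits : Int) (phrase : String) =>
      let cleaned := PySem.Str.lower (PySem.Str.strip phrase)
      if cleaned ≠ "" ∧ PySem.Str.isIn cleaned n then hits + 1 else hits)
    = (fun h p => if pvClean p ≠ "" ∧ PySem.Str.isIn (pvClean p) n then h + 1 else h)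
    from rfl]
  rw [pv_foldl_count, ← hL, zero_add]
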